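-- pv_equiv track=rewrite | github.com/HanaDevonaldDavies/CFG_Final_exam_HDD | CFG Main Exam Section 2.py | count_unique_consonants
-- ===== SOURCE A (Python) =====
-- def count_unique_consonants(s):
--     s = s.lower()
--     consonants = "bcdfghjklmnpqrstvwxyz"
--     consonant_count = {}
--
--     for char in s:
--         if char in consonants:
--             consonant_count[char] = consonant_count.get(char, 0) + 1
--
--     return sum(1 for count in consonant_count.values() if count == 1)
-- ===== SOURCE B (Python) =====
-- def count_unique_consonants(s):
--     t = s.lower()
--     return sum(1 for c in "bcdfghjklmnpqrstvwxyz" if t.count(c) == 1)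
-- ===== Notes on version B (the rewrite author's own statement) =====
-- stated objective: idiomatic
-- what changed: Replaces the build-a-frequency-dict-then-scan-its-values approach by a single comprehension over the fixed 21-letter consonant alphabet, counting each consonant's occurrences in the lowercased string directly with str.count.
import Mathlib
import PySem

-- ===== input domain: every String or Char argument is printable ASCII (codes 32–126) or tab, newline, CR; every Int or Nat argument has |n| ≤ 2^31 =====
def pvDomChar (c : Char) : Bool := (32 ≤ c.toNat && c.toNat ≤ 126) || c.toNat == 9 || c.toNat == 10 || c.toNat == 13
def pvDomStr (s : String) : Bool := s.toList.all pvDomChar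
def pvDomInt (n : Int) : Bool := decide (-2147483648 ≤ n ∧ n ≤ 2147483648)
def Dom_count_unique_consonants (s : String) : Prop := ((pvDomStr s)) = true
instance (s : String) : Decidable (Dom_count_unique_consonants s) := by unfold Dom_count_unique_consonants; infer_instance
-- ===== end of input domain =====

-- B replaces A's frequency-dict-then-scan by one pass over the fixed consonant
-- alphabet using str.count (idiomatic; a timing run measured B faster by a constant factor).

-- ===== PORT A =====
def count_unique_consonants (s : String) : Int :=
  let t := PySem.Str.lower s
  let consonants := "bcdfghjklmnpqrstvwxyz"
  let d : PySem.Dict Char Int :=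
    t.toList.foldl
      (fun d char =>
        if PySem.Str.isIn (String.ofList [char]) consonants then
          d.insert char (d.getD char 0 + 1)
        else d)
      PySem.Dict.empty
  d.values.foldl (fun acc count => if count == 1 then acc + 1 else acc) 0

-- ===== PORT B =====
def count_unique_consonants_alt (s : String) : Int :=
  let t := PySem.Str.lower s
  ("bcdfghjklmnpqrstvwxyz".toList).foldl
    (fun acc c => if PySem.Str.count t (String.ofList [c]) == 1 then acc + 1 else acc) 0

-- ===== PRECONDITION & SPEC =====
def Spec_count_unique_consonants (s : String) (out : Int) : Prop := out = count_unique_consonants_alt s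
instance (s : String) (out : Int) : Decidable (Spec_count_unique_consonants s out) := by unfold Spec_count_unique_consonants; infer_instance

-- ===== CLAIM (what is proved, stated in full; the proofs are below) =====
def Claim_equal_count_unique_consonants : Prop := ∀ (s : String), Dom_count_unique_consonants s → Spec_count_unique_consonants s (count_unique_consonants s)

-- ===== LEMMAS AND PROOFS =====

-- 'c in consonants' for a single character is list membership
theorem pvIsIn_singleton (c : Char) (l : List Char) :
    PySem.Chars.isIn [c] l = l.contains c := by
  rw [Bool.eq_iff_iff, PySem.Chars.isIn_iff_infix, List.contains_iff_mem]
  constructor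
  · intro h
    exact h.subset (List.mem_singleton_self c)
  · intro h
    obtain ⟨p, q, rfl⟩ := List.append_of_mem h
    exact ⟨p, q, by simp⟩

theorem pvCount_go_singleton (c : Char) :
    ∀ (fuel : Nat) (l : List Char) (acc : Nat), l.length ≤ fuel →
      PySem.Chars.count.go [c] fuel l acc = acc + l.count c := by
  intro fuel
  induction fuel with
  | zero =>
    intro l acc h
    have : l = [] := List.eq_nil_of_length_eq_zero (Nat.le_zero.mp h)
    subst this
    simp [PySem.Chars.count.go]
  | succ n ih =>
    intro l acc h
    cases l with
    | nil => simp [PySem.Chars.count.go]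
    | cons x xs =>
      by_cases hx : x = c
      · subst hx
        rw [show PySem.Chars.count.go [x] (n+1) (x :: xs) acc
              = PySem.Chars.count.go [x] n xs (acc + 1) by
            simp [PySem.Chars.count.go, List.isPrefixOf]]
        rw [ih xs (acc + 1) (by simpa using Nat.lt_succ_iff.mp (by simpa using h))]
        simp [List.count_cons]
        omega
      · rw [show PySem.Chars.count.go [c] (n+1) (x :: xs) acc
              = PySem.Chars.count.go [c] n xs acc by
            simp [PySem.Chars.count.go, List.isPrefixOf, Ne.symm hx]]
        rw [ih xs acc (by simpa using Nat.lt_succ_iff.mp (by simpa using h))]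
        simp [List.count_cons, hx]

theorem pvCount_singleton (l : List Char) (c : Char) :
    PySem.Chars.count l [c] = l.count c := by
  rw [show PySem.Chars.count l [c] = PySem.Chars.count.go [c] l.length l 0 by
        simp [PySem.Chars.count]]
  simpa using pvCount_go_singleton c l.length l 0 le_rfl

theorem pvFoldl_if_filter {α β : Type} (q : α → Bool) (f : β → α → β) :
    ∀ (l : List α) (b : β),
      l.foldl (fun d x => if q x then f d x else d) b = (l.filter q).foldl f b := by
  intro l
  induction l with
  | nil => intro b; rfl
  | cons x xs ih =>
    intro b
    by_cases hx : q x = true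
    · simp [List.filter_cons, hx, ih]
    · simp [List.filter_cons, Bool.eq_false_iff.mpr hx, ih, hx]

theorem pvMain (s : String) :
    count_unique_consonants s = count_unique_consonants_alt s := by
  unfold count_unique_consonants count_unique_consonants_alt
  simp only [PySem.Str.isIn_eq, PySem.Str.count_eq]
  have hmk : ∀ c : Char, (String.ofList [c]).toList = [c] := fun c => by
    exact String.toList_ofList
  simp only [hmk, pvIsIn_singleton, pvCount_singleton, PySem.Str.toList_lower]
  set tl : List Char := PySem.Chars.lower s.toList with htl
  set cl : List Char := "bcdfghjklmnpqrstvwxyz".toList with hcl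
  rw [pvFoldl_if_filter (fun c => cl.contains c)
        (fun (d : PySem.Dict Char Int) c => d.insert c (d.getD c 0 + 1)) tl]
  rw [PySem.Dict.foldl_insert_getD_add_one_eq_counter]
  set fl : List Char := tl.filter (fun c => cl.contains c) with hfl
  have hvals : (PySem.Dict.counter fl).values
      = (PySem.Set.ofList fl).map (fun k => (fl.count k : Int)) := by
    show ((PySem.Dict.counter fl).items).map Prod.snd = _
    rw [PySem.Dict.items_counter]
    simp [List.map_map, Function.comp]
  rw [hvals]
  rw [PySem.List.foldl_beq_add_one, PySem.List.foldl_if_add_one]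
  simp only [zero_add]
  congr 1
  -- count 1 over the mapped counts = countP over the alphabet
  have hcl_nodup : cl.Nodup := by rw [hcl]; decide
  rw [List.count_eq_countP, List.countP_map,
      List.countP_eq_length_filter, List.countP_eq_length_filter]
  have h1 := (PySem.Set.nodup_ofList fl).filter
      ((fun x => x == (1 : Int)) ∘ fun k => (List.count k fl : Int))
  have h2 := hcl_nodup.filter (fun c => List.count c tl == 1)
  rw [← List.toFinset_card_of_nodup h1, ← List.toFinset_card_of_nodup h2]
  congr 1
  ext x
  simp only [List.mem_toFinset, List.mem_filter, PySem.Set.mem_ofList,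
    Function.comp, beq_iff_eq, Nat.cast_eq_one, hfl, List.contains_iff_mem]
  constructor
  · rintro ⟨⟨hxtl, hxcl⟩, hcnt⟩
    refine ⟨hxcl, ?_⟩
    rwa [List.count_filter (by simpa [List.contains_iff_mem] using hxcl)] at hcnt
  · rintro ⟨hxcl, hcnt⟩
    have hxtl : x ∈ tl := List.count_pos_iff.mp (by omega)
    refine ⟨⟨hxtl, hxcl⟩, ?_⟩
    rwa [List.count_filter (by simpa [List.contains_iff_mem] using hxcl)]

-- ===== VERDICT (by name: the statement is the Claim_ definition above) =====
theorem count_unique_consonants_spec : Claim_equal_count_unique_consonants := by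
  intro s _
  unfold Spec_count_unique_consonants
  exact pvMain s
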